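-- pv_equiv track=rewrite | github.com/JaviLianes8/RealTajoFCBack | src/app/domain/services/classification_decoders.py | _normalize_stats_section
-- ===== SOURCE A (Python) =====
-- from typing import Iterable, List, Sequence
--
-- _FORM_TOKEN_TO_POINTS = {"G": "3", "E": "1", "P": "0"}
--
-- def _normalize_stats_section(section: str) -> str:
--     """Return ``section`` replacing known form tokens with numeric values."""
--
--     tokens = section.split()
--     if not tokens:
--         return section
--
--     normalized_tokens: List[str] = []
--     accumulated_form_points: List[int] = []
--
--     def flush_form_points() -> None:
--         if accumulated_form_points:
--             normalized_tokens.append(str(sum(accumulated_form_points)))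
--             accumulated_form_points.clear()
--
--     for token in tokens:
--         mapped = _FORM_TOKEN_TO_POINTS.get(token.upper())
--         if mapped is not None:
--             accumulated_form_points.append(int(mapped))
--             continue
--
--         flush_form_points()
--         normalized_tokens.append(token)
--
--     flush_form_points()
--
--     return " ".join(normalized_tokens)
-- ===== SOURCE B (Python) =====
-- _FORM_TOKEN_TO_POINTS = {"G": "3", "E": "1", "P": "0"}
--
--
-- def _points(token):
--     mapped = _FORM_TOKEN_TO_POINTS.get(token.upper())
--     return None if mapped is None else int(mapped)
--
--
-- def _run(total, rest):
--     # consume a maximal run of form tokens, summing their points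
--     while rest and _points(rest[0]) is not None:
--         total += _points(rest[0])
--         rest = rest[1:]
--     return total, rest
--
--
-- def _emit(tokens):
--     if not tokens:
--         return []
--     p = _points(tokens[0])
--     if p is None:
--         return [tokens[0]] + _emit(tokens[1:])
--     total, rest = _run(p, tokens[1:])
--     return [str(total)] + _emit(rest)
--
--
-- def _normalize_stats_section(section: str) -> str:
--     tokens = section.split()
--     if not tokens:
--         return section
--     return " ".join(_emit(tokens))
-- ===== Notes on version B (the rewrite author's own statement) =====
-- stated objective: alternative
-- what changed: Replaced A's single fold with mutable flush/accumulator state by a direct recursive decomposition that consumes each maximal run of form tokens in one step and emits its sum immediately.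
import Mathlib
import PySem

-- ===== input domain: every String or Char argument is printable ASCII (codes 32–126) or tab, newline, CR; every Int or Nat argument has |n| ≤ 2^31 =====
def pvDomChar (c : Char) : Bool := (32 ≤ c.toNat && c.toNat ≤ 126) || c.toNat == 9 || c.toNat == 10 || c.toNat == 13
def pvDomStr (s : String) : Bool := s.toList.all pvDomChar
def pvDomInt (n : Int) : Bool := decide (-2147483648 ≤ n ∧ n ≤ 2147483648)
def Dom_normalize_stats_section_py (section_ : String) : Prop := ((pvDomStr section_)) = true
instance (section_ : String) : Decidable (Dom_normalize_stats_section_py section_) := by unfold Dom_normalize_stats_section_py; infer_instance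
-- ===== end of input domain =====

-- B replaces A's fold with a mutable flush/accumulator by a recursive decomposition that
-- consumes each maximal run of form tokens in one step (objective: alternative, same cost).

-- ===== PORT A =====
-- module constant _FORM_TOKEN_TO_POINTS (shared by both ports, as in the Python module)
def formDict : PySem.Dict String String :=
  PySem.Dict.ofList [("G", "3"), ("E", "1"), ("P", "0")]

-- nested helper flush_form_points, acting on the loop state (normalized_tokens, accumulated_form_points)
def flushA (st : List String × List Int) : List String × List Int :=
  if st.2 = [] then st
  else (st.1 ++ [PySem.Int.toStr (st.2.foldl (· + ·) 0)], [])

-- body of A's 'for token in tokens' loop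
def aStep (st : List String × List Int) (token : String) : List String × List Int :=
  match PySem.Dict.get? formDict (PySem.Str.upper token) with
  | some mapped =>
      -- int(mapped): the dict values are "3"/"1"/"0", so ofStr? is always some; getD 0 never fires
      (st.1, st.2 ++ [(PySem.Int.ofStr? mapped).getD 0])
  | none =>
      let st := flushA st
      (st.1 ++ [token], st.2)

def normalize_stats_section_py (section_ : String) : String :=
  let tokens := PySem.Str.split₀ section_
  if tokens = [] then section_
  else
    let st := tokens.foldl aStep (([], []) : List String × List Int)
    let st := flushA st
    PySem.Str.join " " st.1

-- ===== PORT B =====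
-- _points: numeric value of a form token, None otherwise
def altPoints (token : String) : Option Int :=
  match PySem.Dict.get? formDict (PySem.Str.upper token) with
  | none => none
  | some mapped => some ((PySem.Int.ofStr? mapped).getD 0)

-- _run: consume a maximal run of form tokens, summing their points
def altRun : Int → List String → Int × List String
  | total, [] => (total, [])
  | total, t :: ts =>
      match altPoints t with
      | some p => altRun (total + p) ts
      | none => (total, t :: ts)

-- used by altEmit's termination proof
theorem altRun_len_le : ∀ (total : Int) (ts : List String),
    (altRun total ts).2.length ≤ ts.length := by
  intro total ts
  induction ts generalizing total with
  | nil => simp [altRun]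
  | cons t ts ih =>
      simp only [altRun]
      cases altPoints t with
      | some p => exact le_trans (ih _) (by simp)
      | none => simp

-- _emit
def altEmit : List String → List String
  | [] => []
  | t :: ts =>
      match altPoints t with
      | none => t :: altEmit ts
      | some p =>
          let r := altRun p ts
          PySem.Int.toStr r.1 :: altEmit r.2
termination_by ts => ts.length
decreasing_by
  · simp
  · have := altRun_len_le p ts
    simp only [List.length_cons]
    omega

def normalize_stats_section_py_alt (section_ : String) : String :=
  let tokens := PySem.Str.split₀ section_
  if tokens = [] then section_
  else PySem.Str.join " " (altEmit tokens)

-- ===== PRECONDITION & SPEC =====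
def Spec_normalize_stats_section_py (section_ : String) (out : String) : Prop := out = normalize_stats_section_py_alt section_
instance (section_ : String) (out : String) : Decidable (Spec_normalize_stats_section_py section_ out) := by unfold Spec_normalize_stats_section_py; infer_instance

-- ===== CLAIM (what is proved, stated in full; the proofs are below) =====
def Claim_equal_normalize_stats_section_py : Prop := ∀ (section_ : String), Dom_normalize_stats_section_py section_ → Spec_normalize_stats_section_py section_ (normalize_stats_section_py section_)

-- ===== LEMMAS AND PROOFS =====

-- what B will still produce given A's pending accumulator acc and remaining tokens ts
def contA (acc : List Int) (ts : List String) : List String :=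
  match acc with
  | [] => altEmit ts
  | _ :: _ =>
      let r := altRun (acc.foldl (· + ·) 0) ts
      PySem.Int.toStr r.1 :: altEmit r.2

theorem main_inv : ∀ (ts : List String) (norm : List String) (acc : List Int),
    (flushA (ts.foldl aStep (norm, acc))).1 = norm ++ contA acc ts := by
  intro ts
  induction ts with
  | nil =>
      intro norm acc
      cases acc with
      | nil => simp [flushA, contA, altEmit]
      | cons a as => simp [flushA, contA, altRun, altEmit]
  | cons t ts ih =>
      intro norm acc
      simp only [List.foldl_cons]
      cases hg : PySem.Dict.get? formDict (PySem.Str.upper t) with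
      | some mapped =>
          have hp : altPoints t = some ((PySem.Int.ofStr? mapped).getD 0) := by
            unfold altPoints
            rw [hg]
          have hstep : aStep (norm, acc) t = (norm, acc ++ [(PySem.Int.ofStr? mapped).getD 0]) := by
            simp [aStep, hg]
          rw [hstep, ih]
          congr 1
          cases acc with
          | nil => simp [contA, altEmit, hp]
          | cons a as => simp [contA, altRun, hp, List.foldl_append]
      | none =>
          have hp : altPoints t = none := by
            unfold altPoints
            rw [hg]
          cases acc with
          | nil =>
              have hstep : aStep (norm, []) t = (norm ++ [t], []) := by
                simp [aStep, hg, flushA]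
              rw [hstep, ih]
              simp [contA, altEmit, hp]
          | cons a as =>
              have hstep : aStep (norm, a :: as) t =
                  (norm ++ [PySem.Int.toStr ((a :: as).foldl (· + ·) 0)] ++ [t], []) := by
                simp [aStep, hg, flushA]
              rw [hstep, ih]
              simp [contA, altRun, altEmit, hp, List.append_assoc]

-- ===== VERDICT (by name: the statement is the Claim_ definition above) =====
theorem normalize_stats_section_py_spec : Claim_equal_normalize_stats_section_py := by
  intro section_ _
  unfold Spec_normalize_stats_section_py normalize_stats_section_py normalize_stats_section_py_alt
  by_cases h : PySem.Str.split₀ section_ = []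
  · simp [h]
  · simp only [h]
    have := main_inv (PySem.Str.split₀ section_) [] []
    simp only [List.nil_append] at this
    rw [this]
    rfl
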